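-- pv_equiv track=rewrite | github.com/jaras209/practical_dm | src/huggingface_multiwoz_dataset.py | action_list_to_str
-- ===== SOURCE A (Python) =====
-- from collections import defaultdict
-- from typing import Optional, List, Any, Tuple, Union, Dict
--
-- def action_list_to_str(action_list: List[str]) -> str:
--     # Create a dictionary to group actions by domain
--     domain_actions = defaultdict(list)
--
--     # Iterate over each action in the list
--     for action in action_list:
--         # Split the action into domain and slot (if applicable)
--         domain, actions = action.split('-')
--
--         # Append the formatted action to the domain's list
--         domain_actions[domain].append(f'{actions}')
--
--     # Generate the final string representation using dictionary and list comprehensions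
--     string_repr = '; '.join(
--         f'{domain} - {", ".join(sorted(actions))}' for domain, actions in sorted(domain_actions.items()))
--     return string_repr
-- ===== SOURCE B (Python) =====
-- from itertools import groupby
-- from typing import List
--
--
-- def action_list_to_str(action_list: List[str]) -> str:
--     # Flat pass: parse every action into a (domain, slot) pair (same strict unpack).
--     pairs = []
--     for action in action_list:
--         domain, slot = action.split('-')
--         pairs.append((domain, slot))
--     # One lexicographic sort of the flat pairs, then a single consecutive-group walk.
--     pairs.sort()
--     return '; '.join(
--         f'{domain} - {", ".join(slot for _, slot in group)}'
--         for domain, group in groupby(pairs, key=lambda p: p[0]))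
-- ===== Notes on version B (the rewrite author's own statement) =====
-- stated objective: alternative
-- what changed: Replaces A's defaultdict-grouping (build a domain->slots index, then sort the keys and sort each bucket) by one lexicographic sort of the flat (domain, slot) pair list followed by a single consecutive groupby pass; Pre_ excludes inputs where some action does not split into exactly two parts on '-' (both A and B raise ValueError there).
import Mathlib
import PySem

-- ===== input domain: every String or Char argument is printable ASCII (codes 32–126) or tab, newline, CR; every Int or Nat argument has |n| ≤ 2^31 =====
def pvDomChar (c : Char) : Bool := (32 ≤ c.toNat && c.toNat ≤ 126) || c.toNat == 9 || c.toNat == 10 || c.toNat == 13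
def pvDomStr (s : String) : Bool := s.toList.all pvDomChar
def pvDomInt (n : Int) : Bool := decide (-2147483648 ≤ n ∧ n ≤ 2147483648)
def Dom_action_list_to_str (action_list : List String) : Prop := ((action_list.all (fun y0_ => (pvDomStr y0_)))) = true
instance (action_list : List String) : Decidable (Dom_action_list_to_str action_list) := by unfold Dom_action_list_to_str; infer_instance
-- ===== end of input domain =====

-- B replaces A's defaultdict index (then sort keys, sort each bucket) by one lexicographic
-- sort of the flat (domain, slot) pairs followed by a single consecutive-group pass
-- (objective: alternative decomposition, same cost).

-- ===== PORT A =====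
-- A: group actions into a dict domain -> list of slots, then render sorted(items).
-- Python sorts items (tuples); dict keys are distinct, so the comparison never reads the
-- second component: sorting by the first component is the same order.
def action_list_to_str (action_list : List String) : String :=
  let domain_actions : PySem.Dict String (List String) :=
    action_list.foldl (fun d action =>
      match PySem.Str.split? action "-" with
      | some [domain, actions] => d.modify domain [] (fun v => v ++ [actions])
      | _ => d) PySem.Dict.empty
  String.ofList (PySem.Chars.join "; ".toList
    ((PySem.List.sorted domain_actions.items (fun p => p.1)).map
      (fun p => p.1.toList ++ " - ".toList ++
        PySem.Chars.join ", ".toList ((PySem.List.sorted p.2 (fun s => s)).map String.toList))))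

-- ===== PORT B =====
-- itertools.groupby on consecutive equal domains (structural recursion over the sorted pairs).
def altGroup : List (String × String) → List (String × List String)
  | [] => []
  | (d, s) :: rest =>
    match altGroup rest with
    | [] => [(d, [s])]
    | (d', ss) :: gs => if d = d' then (d, s :: ss) :: gs else (d, [s]) :: (d', ss) :: gs

def action_list_to_str_alt (action_list : List String) : String :=
  let pairs : List (String × String) :=
    action_list.foldl (fun acc action =>
      match PySem.Str.split? action "-" with
      | none => acc
      | some l =>
        match l with
        | [] => acc
        | [_] => acc
        | [domain, slot] => acc ++ [(domain, slot)]
        | _ :: _ :: _ :: _ => acc) []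
  String.ofList (PySem.Chars.join "; ".toList
    ((altGroup (PySem.List.sorted2 pairs (fun p => p.1) (fun p => p.2))).map
      (fun g => g.1.toList ++ " - ".toList ++
        PySem.Chars.join ", ".toList (g.2.map String.toList))))

-- ===== PRECONDITION & SPEC =====
-- Pre_ excludes exactly the inputs where some action does not split into two parts on '-'
-- (Python's tuple unpacking raises ValueError there, in A and in B alike).
def Pre_action_list_to_str (action_list : List String) : Prop :=
  ∀ a ∈ action_list, ((PySem.Str.split? a "-").getD []).length = 2
instance (action_list : List String) : Decidable (Pre_action_list_to_str action_list) := by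
  unfold Pre_action_list_to_str; infer_instance

def pvWitness_action_list_to_str : List String :=
  ["hotel-area", "taxi-leaveAt", "hotel-stars", "hotel-area"]

def Spec_action_list_to_str (action_list : List String) (out : String) : Prop :=
  out = action_list_to_str_alt action_list
instance (action_list : List String) (out : String) : Decidable (Spec_action_list_to_str action_list out) := by
  unfold Spec_action_list_to_str; infer_instance

-- ===== CLAIM (what is proved, stated in full; the proofs are below) =====
def Claim_equal_action_list_to_str : Prop :=
  ∀ (action_list : List String), Dom_action_list_to_str action_list →
    Pre_action_list_to_str action_list →
    Spec_action_list_to_str action_list (action_list_to_str action_list)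

-- ===== LEMMAS AND PROOFS =====

def pvParse (a : String) : String × String :=
  match PySem.Str.split? a "-" with
  | some [d, s] => (d, s)
  | _ => ("", "")

def pvSlots (ps : List (String × String)) (k : String) : List String :=
  (ps.filter (fun p => p.1 == k)).map (fun p => p.2)

def Ple (a b : String × String) : Prop := a.1 < b.1 ∨ (a.1 = b.1 ∧ a.2 ≤ b.2)

lemma pvParse_split (a : String) (h : ((PySem.Str.split? a "-").getD []).length = 2) :
    PySem.Str.split? a "-" = some [(pvParse a).1, (pvParse a).2] := by
  unfold pvParse
  cases hs : PySem.Str.split? a "-" with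
  | none => simp [hs] at h
  | some l =>
    match l, h with
    | [d, s], _ => simp
    | [], h => simp [hs] at h
    | [x], h => simp [hs] at h
    | (x :: y :: z :: t), h => simp [hs] at h

lemma pvFoldA (l : List String) (d : PySem.Dict String (List String))
    (h : ∀ a ∈ l, ((PySem.Str.split? a "-").getD []).length = 2) :
    l.foldl (fun d action =>
      match PySem.Str.split? action "-" with
      | some [domain, actions] => d.modify domain [] (fun v => v ++ [actions])
      | _ => d) d
    = (l.map pvParse).foldl (fun d p => d.modify p.1 [] (fun v => v ++ [p.2])) d := by
  induction l generalizing d with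
  | nil => rfl
  | cons a t ih =>
    have ha := pvParse_split a (h a (by simp))
    simp only [List.foldl_cons, List.map_cons, ha]
    exact ih _ (fun x hx => h x (by simp [hx]))

lemma pvFoldB (l : List String) (acc : List (String × String))
    (h : ∀ a ∈ l, ((PySem.Str.split? a "-").getD []).length = 2) :
    l.foldl (fun acc action =>
      match PySem.Str.split? action "-" with
      | none => acc
      | some l =>
        match l with
        | [] => acc
        | [_] => acc
        | [domain, slot] => acc ++ [(domain, slot)]
        | _ :: _ :: _ :: _ => acc) acc
    = acc ++ l.map pvParse := by
  induction l generalizing acc with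
  | nil => simp
  | cons a t ih =>
    have ha := pvParse_split a (h a (by simp))
    simp only [List.foldl_cons, List.map_cons, ha]
    rw [ih _ (fun x hx => h x (by simp [hx]))]
    simp

-- dict characterization
lemma pvKeys (ps : List (String × String)) :
    (ps.foldl (fun d p => d.modify p.1 [] (fun v => v ++ [p.2])) PySem.Dict.empty).keys
      = PySem.List.dedup (ps.map Prod.fst) := by
  refine Eq.trans (PySem.Dict.keys_foldl_modify_key ps Prod.fst ([] : List String)
    (fun _ p => fun v => v ++ [p.2]) PySem.Dict.empty) ?_
  simp [pysem, PySem.Set.ofList, List.foldl_map]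

lemma pvGetD (ps : List (String × String)) (k : String) :
    (ps.foldl (fun d p => d.modify p.1 [] (fun v => v ++ [p.2])) PySem.Dict.empty).getD k []
      = pvSlots ps k := by
  refine Eq.trans (PySem.Dict.getD_foldl_modify_append ps PySem.Dict.empty k) ?_
  simp [pvSlots, pysem]

lemma pvItems (ps : List (String × String)) :
    (ps.foldl (fun d p => d.modify p.1 [] (fun v => v ++ [p.2])) PySem.Dict.empty).items
      = (PySem.List.dedup (ps.map Prod.fst)).map (fun k => (k, pvSlots ps k)) := by
  have hnd : (ps.foldl (fun d p => d.modify p.1 [] (fun v => v ++ [p.2])) PySem.Dict.empty).keys.Nodup := by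
    have := PySem.Dict.nodup_keys_foldl_modify_key ps (fun p => p.1) ([] : List String)
      (fun _ p => fun v => v ++ [p.2]) PySem.Dict.empty (by simp [pysem])
    exact this
  rw [PySem.Dict.items_eq_map_keys _ hnd ([] : List String), pvKeys]
  exact List.map_congr_left (fun k _ => by rw [pvGetD])

-- L6: A's sorted items
lemma pvNodupSortedDedup (l : List String) :
    (PySem.List.sorted (PySem.List.dedup l) (fun s => s)).Pairwise (fun a b => a < b) := by
  have hperm := PySem.List.sorted_perm (PySem.List.dedup l) (fun s => s) false
  have hnd : (PySem.List.sorted (PySem.List.dedup l) (fun s => s)).Nodup :=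
    hperm.nodup_iff.mpr (PySem.List.nodup_dedup l)
  have hle := PySem.List.sorted_pairwise (PySem.List.dedup l) (fun s => s)
  exact (hle.and hnd).imp (fun h => lt_of_le_of_ne h.1 h.2)

lemma pvSortedItems (ps : List (String × String)) :
    PySem.List.sorted ((PySem.List.dedup (ps.map Prod.fst)).map (fun k => (k, pvSlots ps k)))
        (fun p => p.1)
      = (PySem.List.sorted (PySem.List.dedup (ps.map Prod.fst)) (fun s => s)).map
          (fun k => (k, pvSlots ps k)) := by
  apply PySem.List.sorted_eq_of_perm_of_pairwise_lt
  · exact (PySem.List.sorted_perm _ _ false).map _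
  · exact List.pairwise_map.mpr (pvNodupSortedDedup _)

-- Ple machinery
lemma pvPle_antisymm (a b : String × String) (h1 : Ple a b) (h2 : Ple b a) : a = b := by
  rcases h1 with h1 | ⟨e1, l1⟩
  · rcases h2 with h2 | ⟨e2, l2⟩
    · exact absurd h2 (lt_asymm h1)
    · exact absurd h1 (by rw [e2]; exact lt_irrefl _)
  · rcases h2 with h2 | ⟨e2, l2⟩
    · exact absurd h2 (by rw [e1]; exact lt_irrefl _)
    · exact Prod.ext e1 (le_antisymm l1 l2)

lemma pvPle_trans (a b c : String × String) (h1 : Ple a b) (h2 : Ple b c) : Ple a c := by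
  rcases h1 with h1 | ⟨e1, l1⟩ <;> rcases h2 with h2 | ⟨e2, l2⟩
  · exact Or.inl (lt_trans h1 h2)
  · exact Or.inl (e2 ▸ h1)
  · exact Or.inl (e1 ▸ h2)
  · exact Or.inr ⟨e1.trans e2, le_trans l1 l2⟩

-- the comparison sorted2 uses
def pvLt (a b : String × String) : Bool :=
  decide (a.1 < b.1) || (!decide (b.1 < a.1) && decide (a.2 < b.2))

lemma pvLt_true (a b : String × String) (h : pvLt a b = true) : Ple a b := by
  simp only [pvLt, Bool.or_eq_true, Bool.and_eq_true, Bool.not_eq_eq_eq_not, Bool.not_true,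
    decide_eq_true_eq, decide_eq_false_iff_not] at h
  rcases h with h | ⟨h1, h2⟩
  · exact Or.inl h
  · rcases lt_trichotomy a.1 b.1 with ht | ht | ht
    · exact Or.inl ht
    · exact Or.inr ⟨ht, le_of_lt h2⟩
    · exact absurd ht h1

lemma pvLt_false (a b : String × String) (h : pvLt a b = false) : Ple b a := by
  simp only [pvLt, Bool.or_eq_false_iff, Bool.and_eq_false_iff, Bool.not_eq_eq_eq_not,
    Bool.not_false, decide_eq_false_iff_not, decide_eq_true_eq] at h
  rcases h with ⟨h1, h2 | h2⟩
  · exact Or.inl (by simpa using h2)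
  · rcases lt_trichotomy a.1 b.1 with ht | ht | ht
    · exact absurd ht h1
    · exact Or.inr ⟨ht.symm, le_of_not_gt (by simpa using h2)⟩
    · exact Or.inl ht

lemma pvInsertBy_pairwise (x : String × String) (ys : List (String × String))
    (h : ys.Pairwise Ple) : (PySem.List.insertBy pvLt x ys).Pairwise Ple := by
  induction ys with
  | nil => simp [PySem.List.insertBy]
  | cons y t ih =>
    rcases h with _ | ⟨hy, ht⟩
    by_cases hb : pvLt x y = true
    · show (PySem.List.insertBy pvLt x (y :: t)).Pairwise Ple
      rw [PySem.List.insertBy, if_pos hb]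
      refine List.Pairwise.cons ?_ (List.Pairwise.cons hy ht)
      intro z hz
      rcases List.mem_cons.mp hz with rfl | hz
      · exact pvLt_true _ _ hb
      · exact pvPle_trans _ _ _ (pvLt_true _ _ hb) (hy z hz)
    · rw [PySem.List.insertBy, if_neg hb]
      refine List.Pairwise.cons ?_ (ih ht)
      intro z hz
      rcases (PySem.List.mem_insertBy pvLt x z t).mp hz with rfl | hz
      · exact pvLt_false _ _ (Bool.eq_false_iff.mpr hb)
      · exact hy z hz

lemma pvSorted2_pairwise (xs : List (String × String)) :
    (PySem.List.sorted2 xs (fun p => p.1) (fun p => p.2)).Pairwise Ple := by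
  have : ∀ (l : List (String × String)) (acc : List (String × String)), acc.Pairwise Ple →
      (l.foldl (fun acc x => PySem.List.insertBy pvLt x acc) acc).Pairwise Ple := by
    intro l
    induction l with
    | nil => exact fun acc h => h
    | cons a t ih => exact fun acc h => ih _ (pvInsertBy_pairwise a acc h)
  exact this xs [] List.Pairwise.nil

lemma pvSorted2_eq (xs ys : List (String × String)) (hperm : ys.Perm xs)
    (hp : ys.Pairwise Ple) :
    PySem.List.sorted2 xs (fun p => p.1) (fun p => p.2) = ys := by
  refine List.Perm.eq_of_pairwise (fun a b _ _ => pvPle_antisymm a b) (pvSorted2_pairwise xs) hp ?_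
  exact (PySem.List.sorted2_perm xs _ _ false).trans hperm.symm

lemma pvConstFst (k : String) (l : List (String × String)) (h : ∀ x ∈ l, x.1 = k) :
    ((l.map (fun p => p.2)).map (fun s => (k, s))) = l := by
  induction l with
  | nil => rfl
  | cons p t ih =>
    obtain ⟨a, b⟩ := p
    have ha : a = k := h (a, b) (by simp)
    simp only [List.map_cons, List.cons.injEq]
    exact ⟨by rw [ha], ih (fun x hx => h x (by simp [hx]))⟩

lemma pvFilterKey (ps : List (String × String)) (k : String) :
    ps.filter (fun p => p.1 == k) = (pvSlots ps k).map (fun s => (k, s)) := by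
  unfold pvSlots
  exact (pvConstFst k _ (fun x hx => by simpa using (List.mem_filter.mp hx).2)).symm

lemma pvPermFlat (ks : List String) (ps : List (String × String)) (hnd : ks.Nodup)
    (hmem : ∀ p ∈ ps, p.1 ∈ ks) :
    (ks.flatMap (fun k => ps.filter (fun p => p.1 == k))).Perm ps := by
  induction ks generalizing ps with
  | nil =>
    cases ps with
    | nil => rfl
    | cons p t => exact absurd (hmem p (by simp)) (by simp)
  | cons k ks ih =>
    rw [List.flatMap_cons]
    rcases List.nodup_cons.mp hnd with ⟨hk, hnd2⟩
    have htail : ks.flatMap (fun k2 => ps.filter (fun p => p.1 == k2))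
        = ks.flatMap (fun k2 => (ps.filter (fun p => !(p.1 == k))).filter (fun p => p.1 == k2)) := by
      apply List.flatMap_congr
      intro k2 hk2
      rw [List.filter_filter]
      refine (List.filter_congr ?_).symm
      intro p _
      by_cases h : p.1 = k2
      · have hne : ¬ k2 = k := fun e => hk (e ▸ hk2)
        simp [h, hne]
      · simp [h]
    have hperm2 : (ks.flatMap (fun k2 =>
        (ps.filter (fun p => !(p.1 == k))).filter (fun p => p.1 == k2))).Perm
        (ps.filter (fun p => !(p.1 == k))) := by
      apply ih _ hnd2
      intro p hp
      rcases List.mem_filter.mp hp with ⟨hps, hne⟩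
      simp only [Bool.not_eq_eq_eq_not, Bool.not_true, beq_eq_false_iff_ne] at hne
      rcases List.mem_cons.mp (hmem p hps) with h | h
      · exact absurd h hne
      · exact h
    rw [htail]
    exact ((List.Perm.append_left _ hperm2).trans (List.filter_append_perm _ ps))

-- sorted distinct keys of ps
def pvKeysSorted (ps : List (String × String)) : List String :=
  PySem.List.sorted (PySem.List.dedup (ps.map Prod.fst)) (fun s => s)

def pvGroup (ps : List (String × String)) (k : String) : List (String × String) :=
  (PySem.List.sorted (pvSlots ps k) (fun s => s)).map (fun s => (k, s))

lemma pvFlatPerm (ps : List (String × String)) :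
    ((pvKeysSorted ps).flatMap (pvGroup ps)).Perm ps := by
  have h1 : ((pvKeysSorted ps).flatMap (pvGroup ps)).Perm
      ((pvKeysSorted ps).flatMap (fun k => ps.filter (fun p => p.1 == k))) := by
    apply List.Perm.flatMap_left
    intro k _
    rw [pvFilterKey]
    exact ((PySem.List.sorted_perm (pvSlots ps k) (fun s => s) false).map _)
  have h2 : ((pvKeysSorted ps).flatMap (fun k => ps.filter (fun p => p.1 == k))).Perm
      ((PySem.List.dedup (ps.map Prod.fst)).flatMap (fun k => ps.filter (fun p => p.1 == k))) :=
    List.Perm.flatMap_right _ (PySem.List.sorted_perm _ _ false)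
  refine (h1.trans h2).trans (pvPermFlat _ _ (PySem.List.nodup_dedup _) ?_)
  intro p hp
  rw [PySem.List.mem_dedup]
  exact List.mem_map.mpr ⟨p, hp, rfl⟩

lemma pvFlatPairwise (ps : List (String × String)) :
    ((pvKeysSorted ps).flatMap (pvGroup ps)).Pairwise Ple := by
  rw [List.pairwise_flatMap]
  constructor
  · intro k _
    unfold pvGroup
    rw [List.pairwise_map]
    exact (PySem.List.sorted_pairwise (pvSlots ps k) (fun s => s)).imp
      (fun h => Or.inr ⟨rfl, h⟩)
  · refine (pvNodupSortedDedup (ps.map Prod.fst)).imp ?_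
    intro a b hab x hx y hy
    rcases List.mem_map.mp hx with ⟨s, _, rfl⟩
    rcases List.mem_map.mp hy with ⟨t, _, rfl⟩
    exact Or.inl hab

lemma pvSorted2Flat (ps : List (String × String)) :
    PySem.List.sorted2 ps (fun p => p.1) (fun p => p.2)
      = (pvKeysSorted ps).flatMap (pvGroup ps) :=
  pvSorted2_eq _ _ (pvFlatPerm ps) (pvFlatPairwise ps)

lemma pvAltGroupAppend (k : String) (s : String) (ss : List String) (t : List (String × String))
    (hhead : ∀ g ∈ (altGroup t).head?, g.1 ≠ k) :
    altGroup ((s :: ss).map (fun x => (k, x)) ++ t) = (k, s :: ss) :: altGroup t := by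
  induction ss generalizing s with
  | nil =>
    simp only [List.map_cons, List.map_nil, List.cons_append, List.nil_append]
    rw [altGroup]
    cases h : altGroup t with
    | nil => simp
    | cons g gs =>
      have : g.1 ≠ k := hhead g (by simp [h])
      obtain ⟨d', ss'⟩ := g
      simp only []
      rw [if_neg (by simpa using fun e => this e.symm)]
  | cons s2 ss2 ih =>
    have := ih s2
    simp only [List.map_cons, List.cons_append] at this ⊢
    rw [altGroup, this]
    simp

lemma pvAltGroupFlat (ks : List String) (f : String → List String)
    (hnd : ks.Pairwise (fun a b => a ≠ b)) (hne : ∀ k ∈ ks, f k ≠ []) :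
    altGroup (ks.flatMap (fun k => (f k).map (fun s => (k, s))))
      = ks.map (fun k => (k, f k)) := by
  induction ks with
  | nil => rfl
  | cons k ks ih =>
    rcases hnd with _ | ⟨hk, hnd'⟩
    rw [List.flatMap_cons]
    have hrec := ih hnd' (fun x hx => hne x (by simp [hx]))
    cases hfk : f k with
    | nil => exact absurd hfk (hne k (by simp))
    | cons s ss =>
      have hh : ∀ g ∈ (altGroup (ks.flatMap (fun k => (f k).map (fun s => (k, s))))).head?,
          g.1 ≠ k := by
        rw [hrec]
        intro g hg
        cases ks with
        | nil => simp at hg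
        | cons k2 ks2 =>
          simp only [List.map_cons, List.head?_cons, Option.mem_some_iff] at hg
          rw [← hg]
          exact (hk k2 (by simp)).symm
      rw [pvAltGroupAppend k s ss _ hh, hrec]
      simp [hfk]

lemma pvAltGroupSorted2 (ps : List (String × String)) :
    altGroup (PySem.List.sorted2 ps (fun p => p.1) (fun p => p.2))
      = (pvKeysSorted ps).map (fun k => (k, PySem.List.sorted (pvSlots ps k) (fun s => s))) := by
  rw [pvSorted2Flat]
  have hflat : (pvKeysSorted ps).flatMap (pvGroup ps)
      = (pvKeysSorted ps).flatMap
          (fun k => (PySem.List.sorted (pvSlots ps k) (fun s => s)).map (fun s => (k, s))) := rfl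
  rw [hflat]
  apply pvAltGroupFlat
  · exact (pvNodupSortedDedup (ps.map Prod.fst)).imp (fun h => ne_of_lt h)
  · intro k hk
    rw [Ne, PySem.List.sorted_eq_nil_iff]
    have hk2 : k ∈ ps.map Prod.fst := by
      have := ((PySem.List.mem_sorted _ _ _ _).mp hk)
      rwa [PySem.List.mem_dedup] at this
    rcases List.mem_map.mp hk2 with ⟨p, hp, rfl⟩
    have : p.2 ∈ pvSlots ps p.1 :=
      List.mem_map.mpr ⟨p, List.mem_filter.mpr ⟨hp, by simp⟩, rfl⟩
    exact List.ne_nil_of_mem this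

theorem action_list_to_str_spec : Claim_equal_action_list_to_str := by
  intro al hdom hpre
  unfold Spec_action_list_to_str action_list_to_str action_list_to_str_alt
  rw [pvFoldA al PySem.Dict.empty hpre, pvFoldB al [] hpre]
  simp only [List.nil_append]
  rw [pvItems, pvSortedItems, pvAltGroupSorted2]
  simp only [pvKeysSorted, List.map_map]
  rfl
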